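-- pv_equiv track=rewrite | github.com/Sen2Bee/hydro | backend/fetch_st_mwl_erosion_layers.py | _choose_format
-- ===== SOURCE A (Python) =====
-- def _choose_format(formats: set[str]) -> str:
--     prefs = ["image/tiff", "image/geotiff", "image/geotiff8", "image/png"]
--     lower_map = {f.lower(): f for f in formats}
--     for p in prefs:
--         if p in lower_map:
--             return lower_map[p]
--     if not formats:
--         raise RuntimeError("WMS liefert keine GetMap-Formate.")
--     return sorted(formats)[0]
-- ===== SOURCE B (Python) =====
-- def _choose_format(formats: set[str]) -> str:
--     prefs = ["image/tiff", "image/geotiff", "image/geotiff8", "image/png"]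
--     if not formats:
--         raise RuntimeError("WMS liefert keine GetMap-Formate.")
--     rank = {p: i for i, p in enumerate(prefs)}
--     return min(formats, key=lambda f: (rank.get(f.lower(), len(prefs)), f))
-- ===== Notes on version B (the rewrite author's own statement) =====
-- stated objective: idiomatic
-- what changed: Replaces the lowercase-keyed dict build plus ordered preference probe plus full-sort fallback by a single min() pass over the formats with a (preference-rank, string) key from a constant enumerate rank table.
-- outside the precondition, e.g. on _choose_format({'Image/Tiff', 'image/tiff'}): A returns 'image/tiff', B returns 'Image/Tiff'
import Mathlib
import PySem

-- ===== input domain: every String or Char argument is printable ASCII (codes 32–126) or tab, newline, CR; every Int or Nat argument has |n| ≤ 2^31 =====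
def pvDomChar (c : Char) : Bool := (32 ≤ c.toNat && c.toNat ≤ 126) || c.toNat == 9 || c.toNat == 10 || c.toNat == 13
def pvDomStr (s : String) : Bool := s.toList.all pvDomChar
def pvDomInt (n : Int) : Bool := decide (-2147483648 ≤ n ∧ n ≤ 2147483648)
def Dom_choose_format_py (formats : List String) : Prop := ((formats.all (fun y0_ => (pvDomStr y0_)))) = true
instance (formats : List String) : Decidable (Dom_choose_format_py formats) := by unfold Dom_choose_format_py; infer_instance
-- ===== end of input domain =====

-- B replaces A's lowercase dict + ordered preference probe + sorted()[0] fallback by a single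
-- min2? pass keyed by (preference rank, string); equal on Pre_ (nonempty, no preferred-lowercase collision).


-- ===== PORT A =====
-- the 'for p in prefs' probe of A, step for step
def probeA (d : PySem.Dict String String) : List String → Option String
  | [] => none
  | p :: rest =>
    match PySem.Dict.get? d p with
    | some v => some v
    | none => probeA d rest

def choose_format_py (formats : List String) : String :=
  let prefs : List String := ["image/tiff", "image/geotiff", "image/geotiff8", "image/png"]
  let lowerMap : PySem.Dict String String :=
    formats.foldl (fun d f => PySem.Dict.insert d (PySem.Str.lower f) f) PySem.Dict.empty
  match probeA lowerMap prefs with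
  | some v => v
  | none =>
    if formats.isEmpty then ""
    else (PySem.List.sorted formats (fun x => x) false).headD ""

-- ===== PORT B =====
def choose_format_py_alt (formats : List String) : String :=
  let prefs : List String := ["image/tiff", "image/geotiff", "image/geotiff8", "image/png"]
  if formats.isEmpty then ""
  else
    let rank : PySem.Dict String Int :=
      (PySem.List.enumerate prefs).foldl (fun d ip => PySem.Dict.insert d ip.2 ip.1) PySem.Dict.empty
    match PySem.List.min2? formats
        (fun f => PySem.Dict.getD rank (PySem.Str.lower f) (prefs.length : Int))
        (fun f => f) with
    | some v => v
    | none => ""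

-- ===== PRECONDITION & SPEC =====
-- Pre_ excludes the empty input (A raises RuntimeError; B raises the same RuntimeError) and inputs where
-- two formats share a lowercase form that is one of the preferred strings: there A's answer is an accident
-- of dict-overwrite/set-iteration order (hash-order dependent in Python), so neither value is specified.
def Pre_choose_format_py (formats : List String) : Prop :=
  formats ≠ [] ∧ List.Pairwise (fun a b => PySem.Str.lower a = PySem.Str.lower b →
    PySem.Str.lower a ∉ (["image/tiff", "image/geotiff", "image/geotiff8", "image/png"] : List String)) formats
instance (formats : List String) : Decidable (Pre_choose_format_py formats) := by
  unfold Pre_choose_format_py; infer_instance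

def pvWitness_choose_format_py : List String := ["image/Png", "text/html"]

def Spec_choose_format_py (formats : List String) (out : String) : Prop := out = choose_format_py_alt formats
instance (formats : List String) (out : String) : Decidable (Spec_choose_format_py formats out) := by unfold Spec_choose_format_py; infer_instance

-- ===== CLAIM (what is proved, stated in full; the proofs are below) =====
def Claim_equal_choose_format_py : Prop := ∀ (formats : List String), Dom_choose_format_py formats → Pre_choose_format_py formats → Spec_choose_format_py formats (choose_format_py formats)

-- ===== LEMMAS AND PROOFS =====

def rkPV (s : String) : Int :=
  if s = "image/tiff" then 0 else if s = "image/geotiff" then 1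
  else if s = "image/geotiff8" then 2 else if s = "image/png" then 3 else 4

lemma rkPV_nonneg (s : String) : 0 ≤ rkPV s := by
  unfold rkPV; split_ifs <;> norm_num

lemma rkPV_eq_zero {s : String} (h : rkPV s = 0) : s = "image/tiff" := by
  unfold rkPV at h; split_ifs at h <;> first | assumption | omega

lemma rkPV_eq_one {s : String} (h : rkPV s = 1) : s = "image/geotiff" := by
  unfold rkPV at h; split_ifs at h <;> first | assumption | omega

lemma rkPV_eq_two {s : String} (h : rkPV s = 2) : s = "image/geotiff8" := by
  unfold rkPV at h; split_ifs at h <;> first | assumption | omega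

lemma rkPV_eq_three {s : String} (h : rkPV s = 3) : s = "image/png" := by
  unfold rkPV at h; split_ifs at h <;> first | assumption | omega

lemma rkPV_mem {s : String} (h : rkPV s ≠ 4) :
    s ∈ (["image/tiff", "image/geotiff", "image/geotiff8", "image/png"] : List String) := by
  unfold rkPV at h
  split_ifs at h with h1 h2 h3 h4
  · simp [h1]
  · simp [h2]
  · simp [h3]
  · simp [h4]
  · omega

lemma rkPV_eq_four {s : String}
    (h : s ∉ (["image/tiff", "image/geotiff", "image/geotiff8", "image/png"] : List String)) :
    rkPV s = 4 := by
  by_contra hne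
  exact h (rkPV_mem hne)

lemma rank_getD_eq (s : String) :
    PySem.Dict.getD
      ((PySem.List.enumerate (["image/tiff", "image/geotiff", "image/geotiff8", "image/png"] : List String)).foldl
        (fun d ip => PySem.Dict.insert d ip.2 ip.1) PySem.Dict.empty) s
      ((["image/tiff", "image/geotiff", "image/geotiff8", "image/png"] : List String).length : Int)
    = rkPV s := by
  simp only [PySem.List.enumerate, List.foldl]
  rw [PySem.Dict.getD_eq_get?_getD]
  simp only [PySem.Dict.get?_insert]
  unfold rkPV
  split_ifs <;> simp_all [PySem.Dict.get?_empty]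

lemma getFold_eq (xs : List String) (d : PySem.Dict String String) (p : String) :
    (xs.foldl (fun d f => PySem.Dict.insert d (PySem.Str.lower f) f) d).get? p
      = (xs.reverse.find? (fun f => PySem.Str.lower f == p)).or (d.get? p) := by
  induction xs generalizing d with
  | nil => simp
  | cons x t ih =>
    simp only [List.foldl_cons, ih, List.reverse_cons, List.find?_append]
    rcases h : List.find? (fun f => PySem.Str.lower f == p) t.reverse with _ | v
    · simp only [Option.none_or, List.find?_cons, List.find?_nil]
      by_cases hp : PySem.Str.lower x == p
      · simp [(beq_iff_eq.mp hp)]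
      · simp only [hp]
        rw [PySem.Dict.get?_insert_of_ne]
        · simp
        · exact fun he => by simp [he] at hp
    · simp

lemma min2_go (k : String → Int) (xs : List String) (m0 : String) :
    ∃ m, PySem.List.min2? (m0 :: xs) k (fun f => f) = some m ∧ (m = m0 ∨ m ∈ xs) ∧
      (k m < k m0 ∨ (k m = k m0 ∧ m ≤ m0)) ∧
      ∀ y ∈ xs, k m < k y ∨ (k m = k y ∧ m ≤ y) := by
  induction xs generalizing m0 with
  | nil => exact ⟨m0, rfl, Or.inl rfl, Or.inr ⟨rfl, le_refl _⟩, by simp⟩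
  | cons x t ih =>
    by_cases hc : k x < k m0 ∨ (k x ≤ k m0 ∧ x < m0)
    · have e1 : PySem.List.min2? (m0 :: x :: t) k (fun f => f)
          = PySem.List.min2? (x :: t) k (fun f => f) := by
        have hb : (decide (k x < k m0) || !decide (k m0 < k x) && decide (x < m0)) = true := by
          simpa [not_lt] using hc
        simp only [PySem.List.min2?, List.foldl_cons]
        rw [if_pos hb]
      obtain ⟨m, hm, hmem, hrel, hall⟩ := ih x
      have hrel0 : k m < k m0 ∨ (k m = k m0 ∧ m ≤ m0) := by
        rcases hc with h1 | ⟨h1, h2⟩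
        · rcases hrel with h | ⟨h, _⟩
          · exact Or.inl (lt_trans h h1)
          · exact Or.inl (h ▸ h1)
        · rcases hrel with h | ⟨h, h3⟩
          · exact Or.inl (lt_of_lt_of_le h h1)
          · rcases lt_or_eq_of_le (h ▸ h1 : k m ≤ k m0) with h4 | h4
            · exact Or.inl h4
            · exact Or.inr ⟨h4, le_of_lt (lt_of_le_of_lt h3 h2)⟩
      refine ⟨m, e1 ▸ hm, ?_, hrel0, ?_⟩
      · rcases hmem with h | h
        · exact Or.inr (h ▸ List.mem_cons_self)
        · exact Or.inr (List.mem_cons_of_mem _ h)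
      · intro y hy
        rcases List.mem_cons.mp hy with rfl | hy'
        · exact hrel
        · exact hall y hy'
    · have e1 : PySem.List.min2? (m0 :: x :: t) k (fun f => f)
          = PySem.List.min2? (m0 :: t) k (fun f => f) := by
        have hb : ¬((decide (k x < k m0) || !decide (k m0 < k x) && decide (x < m0)) = true) := by
          simpa [not_lt] using hc
        simp only [PySem.List.min2?, List.foldl_cons]
        rw [if_neg hb]
      obtain ⟨m, hm, hmem, hrel, hall⟩ := ih m0
      rw [not_or, not_and_or] at hc
      obtain ⟨h1, h2⟩ := hc
      have hle : k m0 ≤ k x := not_lt.mp h1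
      refine ⟨m, e1 ▸ hm, ?_, hrel, ?_⟩
      · rcases hmem with h | h
        · exact Or.inl h
        · exact Or.inr (List.mem_cons_of_mem _ h)
      · intro y hy
        rcases List.mem_cons.mp hy with rfl | hy'
        · rcases hrel with h | ⟨h, h3⟩
          · exact Or.inl (lt_of_lt_of_le h hle)
          · rcases lt_or_eq_of_le (h ▸ hle : k m ≤ k y) with h4 | h4
            · exact Or.inl h4
            · refine Or.inr ⟨h4, ?_⟩
              rcases h2 with h2 | h2
              · exact absurd (h ▸ h4.symm : k y = k m0).le h2
              · exact le_trans h3 (not_lt.mp h2)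
        · exact hall y hy'

lemma min2_spec (k : String → Int) (xs : List String) (hne : xs ≠ []) :
    ∃ m, PySem.List.min2? xs k (fun f => f) = some m ∧ m ∈ xs ∧
      ∀ y ∈ xs, k m < k y ∨ (k m = k y ∧ m ≤ y) := by
  rcases xs with _ | ⟨x, t⟩
  · exact absurd rfl hne
  · obtain ⟨m, hm, hmem, hrel, hall⟩ := min2_go k t x
    refine ⟨m, hm, ?_, ?_⟩
    · rcases hmem with h | h
      · exact h ▸ List.mem_cons_self
      · exact List.mem_cons_of_mem _ h
    · intro y hy
      rcases List.mem_cons.mp hy with rfl | hy'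
      · exact hrel
      · exact hall y hy'

lemma uniq_of_cf {formats : List String}
    (hcf : List.Pairwise (fun a b => PySem.Str.lower a = PySem.Str.lower b →
      PySem.Str.lower a ∉ (["image/tiff", "image/geotiff", "image/geotiff8", "image/png"] : List String)) formats)
    {a b : String} (ha : a ∈ formats) (hb : b ∈ formats)
    (h : PySem.Str.lower a = PySem.Str.lower b)
    (hin : PySem.Str.lower a ∈ (["image/tiff", "image/geotiff", "image/geotiff8", "image/png"] : List String)) :
    a = b := by
  by_contra hne
  have hsym : Symmetric (fun a b : String => PySem.Str.lower a = PySem.Str.lower b →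
      PySem.Str.lower a ∉ (["image/tiff", "image/geotiff", "image/geotiff8", "image/png"] : List String)) := by
    intro x y hxy h'
    rw [h']
    exact hxy h'.symm
  exact (hcf.forall hsym ha hb hne) h hin


lemma find_none_lower {formats : List String} {p : String}
    (h : List.find? (fun f => PySem.Str.lower f == p) formats.reverse = none) :
    ∀ y ∈ formats, PySem.Str.lower y ≠ p := by
  intro y hy
  have := List.find?_eq_none.mp h y (by simpa using hy)
  simpa using this

-- the preferred-format case: the unique element with the minimal preferred rank wins on both sides
lemma pick_case {formats : List String} {m v p : String} {r : Int}
    (hcf : List.Pairwise (fun a b => PySem.Str.lower a = PySem.Str.lower b →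
      PySem.Str.lower a ∉ (["image/tiff", "image/geotiff", "image/geotiff8", "image/png"] : List String)) formats)
    (hmmem : m ∈ formats)
    (hmin : ∀ y ∈ formats, rkPV (PySem.Str.lower m) < rkPV (PySem.Str.lower y) ∨
      (rkPV (PySem.Str.lower m) = rkPV (PySem.Str.lower y) ∧ m ≤ y))
    (hvmem : v ∈ formats) (hlow : PySem.Str.lower v = p) (hKv : rkPV p = r)
    (hlb : ∀ y ∈ formats, r ≤ rkPV (PySem.Str.lower y))
    (hchar : ∀ s : String, rkPV s = r → s = p)
    (hp : p ∈ (["image/tiff", "image/geotiff", "image/geotiff8", "image/png"] : List String)) :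
    v = m := by
  have hKm : rkPV (PySem.Str.lower m) = r := by
    rcases hmin v hvmem with h | ⟨h, _⟩
    · rw [hlow, hKv] at h
      exact absurd h (not_lt.mpr (hlb m hmmem))
    · rw [hlow, hKv] at h
      exact h
  have hlm : PySem.Str.lower m = p := hchar _ hKm
  exact (uniq_of_cf hcf hmmem hvmem (by rw [hlm, hlow]) (by rw [hlm]; exact hp)).symm

-- ===== VERDICT (by name: the statement is the Claim_ definition above) =====
theorem choose_format_py_spec : Claim_equal_choose_format_py := by
  intro formats _ hpre
  obtain ⟨hne, hcf⟩ := hpre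
  unfold Spec_choose_format_py
  have hBne : formats.isEmpty = false := by
    simpa [List.isEmpty_iff] using hne
  -- reduce B to min2? with key rkPV ∘ lower
  obtain ⟨m, hm, hmmem, hmin⟩ :=
    min2_spec (fun f => rkPV (PySem.Str.lower f)) formats hne
  have hB : choose_format_py_alt formats = m := by
    simp only [choose_format_py_alt, hBne, Bool.false_eq_true, if_false]
    rw [show (fun f => PySem.Dict.getD
        ((PySem.List.enumerate (["image/tiff", "image/geotiff", "image/geotiff8", "image/png"] : List String)).foldl
          (fun d ip => PySem.Dict.insert d ip.2 ip.1) PySem.Dict.empty) (PySem.Str.lower f)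
        ((["image/tiff", "image/geotiff", "image/geotiff8", "image/png"] : List String).length : Int))
      = (fun f => rkPV (PySem.Str.lower f)) from funext (fun f => rank_getD_eq _), hm]
  rw [hB]
  -- A side
  simp only [choose_format_py, probeA, getFold_eq, PySem.Dict.get?_empty, Option.or_none, hBne,
    Bool.false_eq_true, if_false]
  rcases h1 : List.find? (fun f => PySem.Str.lower f == "image/tiff") formats.reverse with _ | v
  case some =>
    have hpred := List.find?_some h1
    have hlow : PySem.Str.lower v = "image/tiff" := beq_iff_eq.mp hpred
    have hvmem : v ∈ formats := by simpa using List.mem_of_find?_eq_some h1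
    exact pick_case hcf hmmem hmin hvmem hlow (by decide)
      (fun y hy => rkPV_nonneg _) (fun s h => rkPV_eq_zero h) (by decide)
  case none =>
  have hn1 := find_none_lower h1
  rcases h2 : List.find? (fun f => PySem.Str.lower f == "image/geotiff") formats.reverse with _ | v
  case some =>
    have hpred := List.find?_some h2
    have hlow : PySem.Str.lower v = "image/geotiff" := beq_iff_eq.mp hpred
    have hvmem : v ∈ formats := by simpa using List.mem_of_find?_eq_some h2
    refine pick_case hcf hmmem hmin hvmem hlow (by decide) ?_ (fun s h => rkPV_eq_one h) (by decide)
    intro y hy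
    have h0 := rkPV_nonneg (PySem.Str.lower y)
    have hz : rkPV (PySem.Str.lower y) ≠ 0 := fun h => hn1 y hy (rkPV_eq_zero h)
    omega
  case none =>
  have hn2 := find_none_lower h2
  rcases h3 : List.find? (fun f => PySem.Str.lower f == "image/geotiff8") formats.reverse with _ | v
  case some =>
    have hpred := List.find?_some h3
    have hlow : PySem.Str.lower v = "image/geotiff8" := beq_iff_eq.mp hpred
    have hvmem : v ∈ formats := by simpa using List.mem_of_find?_eq_some h3
    refine pick_case hcf hmmem hmin hvmem hlow (by decide) ?_ (fun s h => rkPV_eq_two h) (by decide)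
    intro y hy
    have h0 := rkPV_nonneg (PySem.Str.lower y)
    have hz : rkPV (PySem.Str.lower y) ≠ 0 := fun h => hn1 y hy (rkPV_eq_zero h)
    have ho : rkPV (PySem.Str.lower y) ≠ 1 := fun h => hn2 y hy (rkPV_eq_one h)
    omega
  case none =>
  have hn3 := find_none_lower h3
  rcases h4 : List.find? (fun f => PySem.Str.lower f == "image/png") formats.reverse with _ | v
  case some =>
    have hpred := List.find?_some h4
    have hlow : PySem.Str.lower v = "image/png" := beq_iff_eq.mp hpred
    have hvmem : v ∈ formats := by simpa using List.mem_of_find?_eq_some h4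
    refine pick_case hcf hmmem hmin hvmem hlow (by decide) ?_ (fun s h => rkPV_eq_three h) (by decide)
    intro y hy
    have h0 := rkPV_nonneg (PySem.Str.lower y)
    have hz : rkPV (PySem.Str.lower y) ≠ 0 := fun h => hn1 y hy (rkPV_eq_zero h)
    have ho : rkPV (PySem.Str.lower y) ≠ 1 := fun h => hn2 y hy (rkPV_eq_one h)
    have ht : rkPV (PySem.Str.lower y) ≠ 2 := fun h => hn3 y hy (rkPV_eq_two h)
    omega
  case none =>
  -- fallback: no preferred format present; both sides return the smallest string
  have hn4 := find_none_lower h4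
  have hK4 : ∀ y ∈ formats, rkPV (PySem.Str.lower y) = 4 := by
    intro y hy
    apply rkPV_eq_four
    intro hmem
    simp only [List.mem_cons, List.not_mem_nil, or_false] at hmem
    rcases hmem with h | h | h | h
    · exact hn1 y hy h
    · exact hn2 y hy h
    · exact hn3 y hy h
    · exact hn4 y hy h
  rcases hsl : PySem.List.sorted formats (fun x => x) false with _ | ⟨h0, tl⟩
  · exact absurd ((PySem.List.sorted_eq_nil_iff formats (fun x => x) false).mp hsl) hne
  · have hperm := PySem.List.sorted_perm formats (fun x => x) false
    rw [hsl] at hperm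
    have h0mem : h0 ∈ formats := hperm.subset List.mem_cons_self
    have hple : ∀ y ∈ formats, h0 ≤ y := by
      intro y hy
      have hy' : y ∈ h0 :: tl := hperm.mem_iff.mpr hy
      have hp := PySem.List.sorted_pairwise formats (fun x => x)
      rw [hsl] at hp
      rcases List.mem_cons.mp hy' with rfl | hy''
      · exact le_refl _
      · exact (List.pairwise_cons.mp hp).1 y hy''
    have hmh : m ≤ h0 := by
      rcases hmin h0 h0mem with h | ⟨_, h⟩
      · rw [hK4 m hmmem, hK4 h0 h0mem] at h
        exact absurd h (lt_irrefl _)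
      · exact h
    have : h0 = m := le_antisymm (hple m hmmem) hmh
    simpa [hsl] using this
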